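-- pv_equiv track=rewrite | github.com/drewdas/algorithms-and-datastructures-in-python | arrays_strings/cafe_orders.py | is_first_come_first_served
-- ===== SOURCE A (Python) =====
-- def is_first_come_first_served(take_out_orders, dine_in_orders, served_orders):
--     take_out_orders_index = 0
--     dine_in_orders_index = 0
--     take_out_orders_max_index = len(take_out_orders) - 1
--     dine_in_orders_max_index = len(dine_in_orders) - 1
--
--     for order in served_orders:
--         # If we still have orders in take_out_orders
--         # and the current order in take_out_orders is the same
--         # as the current order in served_orders
--         if take_out_orders_index <= take_out_orders_max_index and order == take_out_orders[take_out_orders_index]: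
--             take_out_orders_index += 1
--
--         # If we still have orders in dine_in_orders
--         # and the current order in dine_in_orders is the same
--         # as the current order in served_orders
--         elif dine_in_orders_index <= dine_in_orders_max_index and order == dine_in_orders[dine_in_orders_index]:
--             dine_in_orders_index += 1
--
--         # If the current order in served_orders doesn't match the current
--         # order in take_out_orders or dine_in_orders, then we're not serving first-come,
--         # first-served.
--         else:
--             return False
--
--     # Check for any extra orders at the end of take_out_orders or dine_in_orders
--     if dine_in_orders_index != len(dine_in_orders) or take_out_orders_index != len(take_out_orders):
--         return False
--
--     # All orders in served_orders have been "accounted for"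
--     # so we're serving first-come, first-served!
--     return True
-- ===== SOURCE B (Python) =====
-- def is_first_come_first_served(take_out_orders, dine_in_orders, served_orders):
--     # Two pending stacks (the queues reversed) consumed with pop(), instead of
--     # A's index counters and max-index bound arithmetic.
--     pending_take_out = take_out_orders[::-1]
--     pending_dine_in = dine_in_orders[::-1]
--     for order in served_orders:
--         if pending_take_out and pending_take_out[-1] == order:
--             pending_take_out.pop()
--         elif pending_dine_in and pending_dine_in[-1] == order:
--             pending_dine_in.pop()
--         else:
--             return False
--     return not pending_take_out and not pending_dine_in
-- ===== Notes on version B (the rewrite author's own statement) =====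
-- stated objective: alternative
-- what changed: Replaces A's index counters and max-index bound arithmetic with two pending stacks (the queues reversed once up front) that are consumed by pop() and checked for emptiness at the end.
import Mathlib
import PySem

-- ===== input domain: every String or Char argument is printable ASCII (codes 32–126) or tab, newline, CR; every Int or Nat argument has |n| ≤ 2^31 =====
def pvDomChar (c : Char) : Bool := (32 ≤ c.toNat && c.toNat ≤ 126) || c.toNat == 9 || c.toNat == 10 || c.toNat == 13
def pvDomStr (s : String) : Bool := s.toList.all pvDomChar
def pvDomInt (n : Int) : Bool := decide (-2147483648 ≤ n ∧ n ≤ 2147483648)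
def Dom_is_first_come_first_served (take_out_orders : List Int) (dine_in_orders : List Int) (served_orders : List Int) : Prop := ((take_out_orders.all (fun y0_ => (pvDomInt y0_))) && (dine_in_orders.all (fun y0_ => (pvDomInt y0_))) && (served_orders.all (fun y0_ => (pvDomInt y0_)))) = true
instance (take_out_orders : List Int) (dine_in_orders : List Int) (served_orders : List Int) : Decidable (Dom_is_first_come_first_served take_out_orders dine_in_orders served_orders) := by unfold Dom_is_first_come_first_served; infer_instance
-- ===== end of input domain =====

-- B replaces A's index counters with two pending stacks (the queues reversed, consumed by pop); objective: alternative.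

-- ===== PORT A =====
-- the for-loop over served_orders with the two index counters; early `return False` = the `false` branch
def pvLoopA (take_out_orders dine_in_orders : List Int) (tmax dmax : Int)
    (served : List Int) (ti dj : Nat) : Bool :=
  match served with
  | [] =>
      -- final check after the loop
      !(decide (¬ (dj = dine_in_orders.length)) || decide (¬ (ti = take_out_orders.length)))
  | o :: rest =>
      if (ti : Int) ≤ tmax && (PySem.List.pyGet? take_out_orders (ti : Int) == some o) then
        pvLoopA take_out_orders dine_in_orders tmax dmax rest (ti + 1) dj
      else if (dj : Int) ≤ dmax && (PySem.List.pyGet? dine_in_orders (dj : Int) == some o) then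
        pvLoopA take_out_orders dine_in_orders tmax dmax rest ti (dj + 1)
      else
        false

def is_first_come_first_served (take_out_orders : List Int) (dine_in_orders : List Int) (served_orders : List Int) : Bool :=
  pvLoopA take_out_orders dine_in_orders ((take_out_orders.length : Int) - 1)
    ((dine_in_orders.length : Int) - 1) served_orders 0 0

-- ===== PORT B =====
-- the for-loop over served_orders consuming the two pending stacks:
-- `stack[-1]` = pyGet? stack (-1), `stack.pop()` = dropLast, `not stack` / truthiness = isEmpty
def pvConsume (pending_take_out pending_dine_in : List Int) (served : List Int) : Bool :=
  match served with
  | [] => pending_take_out.isEmpty && pending_dine_in.isEmpty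
  | order :: rest =>
      if !pending_take_out.isEmpty && (PySem.List.pyGet? pending_take_out (-1) == some order) then
        pvConsume pending_take_out.dropLast pending_dine_in rest
      else if !pending_dine_in.isEmpty && (PySem.List.pyGet? pending_dine_in (-1) == some order) then
        pvConsume pending_take_out pending_dine_in.dropLast rest
      else
        false

def is_first_come_first_served_alt (take_out_orders : List Int) (dine_in_orders : List Int) (served_orders : List Int) : Bool :=
  pvConsume take_out_orders.reverse dine_in_orders.reverse served_orders

-- ===== PRECONDITION & SPEC =====
def Spec_is_first_come_first_served (take_out_orders : List Int) (dine_in_orders : List Int) (served_orders : List Int) (out : Bool) : Prop := out = is_first_come_first_served_alt take_out_orders dine_in_orders served_orders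
instance (take_out_orders : List Int) (dine_in_orders : List Int) (served_orders : List Int) (out : Bool) : Decidable (Spec_is_first_come_first_served take_out_orders dine_in_orders served_orders out) := by unfold Spec_is_first_come_first_served; infer_instance

-- ===== CLAIM (what is proved, stated in full; the proofs are below) =====
def Claim_equal_is_first_come_first_served : Prop := ∀ (take_out_orders : List Int) (dine_in_orders : List Int) (served_orders : List Int), Dom_is_first_come_first_served take_out_orders dine_in_orders served_orders → Spec_is_first_come_first_served take_out_orders dine_in_orders served_orders (is_first_come_first_served take_out_orders dine_in_orders served_orders)

-- ===== LEMMAS AND PROOFS =====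

lemma pv_isEmpty_drop (t : List Int) (ti : Nat) (hti : ti ≤ t.length) :
    (t.drop ti).isEmpty = decide (ti = t.length) := by
  by_cases h : ti = t.length
  · subst h; simp
  · have hlt : ti < t.length := lt_of_le_of_ne hti h
    simp [List.drop_eq_nil_iff, h]
    omega

-- B's stack condition on a nonempty stack xs ++ [x]
lemma pv_cond_concat (xs : List Int) (x o : Int) :
    (!(xs ++ [x]).isEmpty && (PySem.List.pyGet? (xs ++ [x]) (-1) == some o))
      = decide (o = x) := by
  rw [PySem.List.pyGet?_neg_one_append_singleton]
  by_cases h : o = x <;> simp [h]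
  exact fun hx => h hx.symm

lemma pv_key (served t d : List Int) :
    ∀ ti dj : Nat, ti ≤ t.length → dj ≤ d.length →
      pvLoopA t d ((t.length : Int) - 1) ((d.length : Int) - 1) served ti dj
        = pvConsume (t.drop ti).reverse (d.drop dj).reverse served := by
  induction served with
  | nil =>
      intro ti dj hti hdj
      simp only [pvLoopA, pvConsume, List.isEmpty_reverse,
        pv_isEmpty_drop t ti hti, pv_isEmpty_drop d dj hdj]
      by_cases h1 : ti = t.length <;> by_cases h2 : dj = d.length <;> simp [h1, h2]
  | cons o rest ih =>
      intro ti dj hti hdj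
      by_cases hlt : ti < t.length
      · have hdrop : t.drop ti = t[ti] :: t.drop (ti + 1) := List.drop_eq_getElem_cons hlt
        have hrev : (t.drop ti).reverse = (t.drop (ti + 1)).reverse ++ [t[ti]] := by
          rw [hdrop, List.reverse_cons]
        have hget : PySem.List.pyGet? t (ti : Int) = some t[ti] := by
          simp [PySem.List.pyGet?_natCast, List.getElem?_eq_getElem hlt]
        by_cases ho : o = t[ti]
        · have hc : ((ti : Int) ≤ (t.length : Int) - 1 && (PySem.List.pyGet? t (ti : Int) == some o)) = true := by
            simp [hget, ho]; omega
          simp only [pvLoopA, hc, if_true]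
          simp only [pvConsume, hrev, pv_cond_concat, ho, decide_true, List.dropLast_concat]
          exact ih (ti + 1) dj hlt hdj
        · have hc : ((ti : Int) ≤ (t.length : Int) - 1 && (PySem.List.pyGet? t (ti : Int) == some o)) = false := by
            simp [hget]; intro _; exact fun h => ho h.symm
          have hcB : decide (o = t[ti]) = false := by simp [ho]
          simp only [pvLoopA, hc, Bool.false_eq_true, if_false]
          simp only [pvConsume, hrev, pv_cond_concat, hcB, Bool.false_eq_true, if_false]
          by_cases hdlt : dj < d.length
          · have hdropd : d.drop dj = d[dj] :: d.drop (dj + 1) := List.drop_eq_getElem_cons hdlt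
            have hrevd : (d.drop dj).reverse = (d.drop (dj + 1)).reverse ++ [d[dj]] := by
              rw [hdropd, List.reverse_cons]
            have hgetd : PySem.List.pyGet? d (dj : Int) = some d[dj] := by
              simp [PySem.List.pyGet?_natCast, List.getElem?_eq_getElem hdlt]
            by_cases ho2 : o = d[dj]
            · have hc2 : ((dj : Int) ≤ (d.length : Int) - 1 && (PySem.List.pyGet? d (dj : Int) == some o)) = true := by
                simp [hgetd, ho2]; omega
              simp only [hc2, if_true]
              simp only [hrevd, pv_cond_concat, ho2, decide_true, List.dropLast_concat]
              rw [← hrev]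
              exact ih ti (dj + 1) hti hdlt
            · have hc2 : ((dj : Int) ≤ (d.length : Int) - 1 && (PySem.List.pyGet? d (dj : Int) == some o)) = false := by
                simp [hgetd]; intro _; exact fun h => ho2 h.symm
              have hcB2 : decide (o = d[dj]) = false := by simp [ho2]
              simp only [hc2, Bool.false_eq_true, if_false]
              simp only [hrevd, pv_cond_concat, hcB2, Bool.false_eq_true, if_false]
          · have hde : dj = d.length := le_antisymm hdj (not_lt.mp hdlt)
            have hdropd : (d.drop dj).reverse = ([] : List Int) := by simp [hde]
            have hc2 : ((dj : Int) ≤ (d.length : Int) - 1 && (PySem.List.pyGet? d (dj : Int) == some o)) = false := by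
              have : ¬ ((dj : Int) ≤ (d.length : Int) - 1) := by omega
              simp [this]
            simp only [hc2, Bool.false_eq_true, if_false, hdropd, List.isEmpty_nil,
              Bool.not_true, Bool.false_and]
      · have hte : ti = t.length := le_antisymm hti (not_lt.mp hlt)
        have hdrop : (t.drop ti).reverse = ([] : List Int) := by simp [hte]
        have hc : ((ti : Int) ≤ (t.length : Int) - 1 && (PySem.List.pyGet? t (ti : Int) == some o)) = false := by
          have : ¬ ((ti : Int) ≤ (t.length : Int) - 1) := by omega
          simp [this]
        simp only [pvLoopA, hc, Bool.false_eq_true, if_false, pvConsume, hdrop,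
          List.isEmpty_nil, Bool.not_true, Bool.false_and]
        by_cases hdlt : dj < d.length
        · have hdropd : d.drop dj = d[dj] :: d.drop (dj + 1) := List.drop_eq_getElem_cons hdlt
          have hrevd : (d.drop dj).reverse = (d.drop (dj + 1)).reverse ++ [d[dj]] := by
            rw [hdropd, List.reverse_cons]
          have hgetd : PySem.List.pyGet? d (dj : Int) = some d[dj] := by
            simp [PySem.List.pyGet?_natCast, List.getElem?_eq_getElem hdlt]
          by_cases ho2 : o = d[dj]
          · have hc2 : ((dj : Int) ≤ (d.length : Int) - 1 && (PySem.List.pyGet? d (dj : Int) == some o)) = true := by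
              simp [hgetd, ho2]; omega
            simp only [hc2, if_true]
            simp only [hrevd, pv_cond_concat, ho2, decide_true, List.dropLast_concat]
            exact hdrop ▸ ih ti (dj + 1) hti hdlt
          · have hc2 : ((dj : Int) ≤ (d.length : Int) - 1 && (PySem.List.pyGet? d (dj : Int) == some o)) = false := by
              simp [hgetd]; intro _; exact fun h => ho2 h.symm
            have hcB2 : decide (o = d[dj]) = false := by simp [ho2]
            simp only [hc2, Bool.false_eq_true, if_false]
            simp only [hrevd, pv_cond_concat, hcB2, Bool.false_eq_true, if_false]
        · have hde : dj = d.length := le_antisymm hdj (not_lt.mp hdlt)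
          have hdropd : (d.drop dj).reverse = ([] : List Int) := by simp [hde]
          have hc2 : ((dj : Int) ≤ (d.length : Int) - 1 && (PySem.List.pyGet? d (dj : Int) == some o)) = false := by
            have : ¬ ((dj : Int) ≤ (d.length : Int) - 1) := by omega
            simp [this]
          simp only [hc2, Bool.false_eq_true, if_false, hdropd, List.isEmpty_nil,
            Bool.not_true, Bool.false_and]

-- ===== VERDICT (by name: the statement is the Claim_ definition above) =====
theorem is_first_come_first_served_spec : Claim_equal_is_first_come_first_served := by
  intro t d s _
  unfold Spec_is_first_come_first_served is_first_come_first_served is_first_come_first_served_alt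
  have := pv_key s t d 0 0 (Nat.zero_le _) (Nat.zero_le _)
  simpa using this
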